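-- pv_equiv track=rewrite | github.com/borhanMorphy/faster_rcnn | calc.py | alexnet
-- ===== SOURCE A (Python) =====
-- class Conv():
--     def __init__(self,kernel,stride,padding,fc):
--         self.stride = stride
--         self.padding = padding
--         self.kernel = kernel
--         self.fc = fc
--
--     def __call__(self,w,h,c):
--         return self._calc(w),self._calc(h),self.fc
--
--     def _calc(self,d):
--         return int((d-self.kernel+2*self.padding)/self.stride + 1)
--
-- class Pool():
--     def __init__(self,kernel,stride,padding):
--         self.stride = stride
--         self.padding = padding
--         self.kernel = kernel
--
--     def __call__(self,w,h,c):
--         return self._calc(w),self._calc(h),c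
--
--     def _calc(self,d):
--         return int((d-self.kernel+2*self.padding)/self.stride + 1)
--
-- def alexnet(w,h,c):
--     ops = []
--     ops.append(Conv(11,4,0,96))
--     ops.append(Pool(3,2,0))
--
--     ops.append(Conv(5,1,2,256))
--     ops.append(Pool(3,2,0))
--
--     ops.append(Conv(3,1,1,384))
--     ops.append(Conv(3,1,1,384))
--     ops.append(Conv(3,1,1,256))
--     ops.append(Pool(3,2,0))
--
--     for op in ops:
--         w,h,c = op(w,h,c)
--
--     return w,h,c
-- ===== SOURCE B (Python) =====
-- def alexnet(w, h, c):
--     # Direct computation: each stride-1 conv (5/1/2, 3/1/1) preserves the spatial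
--     # dimension exactly, so only conv 11/4/0 and the three pools 3/2/0 matter;
--     # the channel output is always the last conv's 256 fc, independent of c.
--     def step(d, k, s):
--         return int((d - k) / s + 1)
--     w = step(step(step(step(w, 11, 4), 3, 2), 3, 2), 3, 2)
--     h = step(step(step(step(h, 11, 4), 3, 2), 3, 2), 3, 2)
--     return w, h, 256
-- ===== Notes on version B (the rewrite author's own statement) =====
-- stated objective: simpler
-- what changed: Replaces the Conv/Pool classes and the ops-list fold with straight-line arithmetic: the stride-1 convs are dimension-preserving identities and are dropped, only conv 11/4/0 and the three 3/2/0 pools are computed, and the channel is the constant 256.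
import Mathlib
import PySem

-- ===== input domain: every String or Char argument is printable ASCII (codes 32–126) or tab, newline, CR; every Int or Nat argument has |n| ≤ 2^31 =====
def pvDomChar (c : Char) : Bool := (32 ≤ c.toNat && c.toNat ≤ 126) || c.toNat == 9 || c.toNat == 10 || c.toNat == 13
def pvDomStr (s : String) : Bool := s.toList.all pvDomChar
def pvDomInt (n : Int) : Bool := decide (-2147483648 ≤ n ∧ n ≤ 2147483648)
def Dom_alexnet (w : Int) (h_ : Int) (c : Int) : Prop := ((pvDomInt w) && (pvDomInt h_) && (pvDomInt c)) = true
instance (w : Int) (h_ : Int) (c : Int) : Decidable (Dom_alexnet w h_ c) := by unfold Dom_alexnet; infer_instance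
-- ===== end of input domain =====

-- B replaces the Conv/Pool classes and ops-list fold with straight-line arithmetic
-- (stride-1 convs are identities, channel is the constant 256): simpler, same result.


-- ===== PORT A =====
-- An op is Conv(kernel, stride, padding, fc) or Pool(kernel, stride, padding).
inductive PyOp : Type
  | conv : Int → Int → Int → Int → PyOp
  | pool : Int → Int → Int → PyOp

-- _calc: int((d - kernel + 2*padding)/stride + 1).  Python '/' is float division, but
-- every stride here is 1, 2 or 4 and |operand| ≤ 2^31 + 22 < 2^53, so the division and
-- the +1 are exact in IEEE floats; int() then truncates toward zero, which on ints is
-- Int.tdiv of (d - k + 2*p + s) by s (adding the integer 1 before truncation is exact).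
def pyCalc (kernel stride padding d : Int) : Int :=
  (d - kernel + 2 * padding + stride).tdiv stride

def pyApply : PyOp → Int × Int × Int → Int × Int × Int
  | .conv k s p fc, (w, h, _) => (pyCalc k s p w, pyCalc k s p h, fc)
  | .pool k s p,    (w, h, c) => (pyCalc k s p w, pyCalc k s p h, c)

def alexnet (w : Int) (h_ : Int) (c : Int) : Int × Int × Int :=
  let ops : List PyOp :=
    [ .conv 11 4 0 96, .pool 3 2 0,
      .conv 5 1 2 256, .pool 3 2 0,
      .conv 3 1 1 384, .conv 3 1 1 384, .conv 3 1 1 256, .pool 3 2 0 ]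
  ops.foldl (fun whc op => pyApply op whc) (w, h_, c)

-- ===== PORT B =====
-- step(d,k,s) = int((d-k)/s + 1); same exact-float argument as above: s ∈ {2,4},
-- so this is truncation toward zero of (d - k + s)/s.
def stepB (d k s : Int) : Int := (d - k + s).tdiv s

def alexnet_alt (w : Int) (h_ : Int) (c : Int) : Int × Int × Int :=
  (stepB (stepB (stepB (stepB w 11 4) 3 2) 3 2) 3 2,
   stepB (stepB (stepB (stepB h_ 11 4) 3 2) 3 2) 3 2,
   256)

-- ===== PRECONDITION & SPEC =====
def Spec_alexnet (w : Int) (h_ : Int) (c : Int) (out : Int × Int × Int) : Prop := out = alexnet_alt w h_ c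
instance (w : Int) (h_ : Int) (c : Int) (out : Int × Int × Int) : Decidable (Spec_alexnet w h_ c out) := by unfold Spec_alexnet; infer_instance

-- ===== CLAIM (what is proved, stated in full; the proofs are below) =====
def Claim_equal_alexnet : Prop := ∀ (w : Int) (h_ : Int) (c : Int), Dom_alexnet w h_ c → Spec_alexnet w h_ c (alexnet w h_ c)

-- ===== LEMMAS AND PROOFS =====
-- A stride-1 layer is the identity on a dimension.
theorem pyCalc_conv5 (d : Int) : pyCalc 5 1 2 d = d := by
  simp only [pyCalc, Int.tdiv_one]; omega

theorem pyCalc_conv3 (d : Int) : pyCalc 3 1 1 d = d := by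
  simp only [pyCalc, Int.tdiv_one]; omega

theorem pyCalc_pool (d : Int) : pyCalc 3 2 0 d = stepB d 3 2 := by
  simp [pyCalc, stepB]

theorem pyCalc_conv11 (d : Int) : pyCalc 11 4 0 d = stepB d 11 4 := by
  simp [pyCalc, stepB]

-- ===== VERDICT (by name: the statement is the Claim_ definition above) =====
theorem alexnet_spec : Claim_equal_alexnet := by
  intro w h_ c _
  show alexnet w h_ c = alexnet_alt w h_ c
  simp only [alexnet, alexnet_alt, List.foldl, pyApply,
    pyCalc_conv5, pyCalc_conv3, pyCalc_pool, pyCalc_conv11]
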